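-- pv_equiv track=rewrite | github.com/ARG-NCTU/bt_prompt | scripts/utils.py | find_list_index
-- ===== SOURCE A (Python) =====
-- def find_list_index(input_list, target_key):
--     result = []
--     start_idx = None
--
--     for i, value in enumerate(input_list):
--         if value == target_key:
--             if start_idx is None:
--                 start_idx = i
--         else:
--             if start_idx is not None:
--                 result.append((start_idx, i - 1))
--                 start_idx = None
--
--     if start_idx is not None:
--         result.append((start_idx, len(input_list) - 1))
--
--     if len(result) == 0:
--         result = None
--     return result
-- ===== SOURCE B (Python) =====
-- def find_list_index(input_list, target_key):
--     marks = [v == target_key for v in input_list]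
--     starts = [i for i, (prev, cur) in enumerate(zip([False] + marks, marks)) if cur and not prev]
--     ends = [i for i, (cur, nxt) in enumerate(zip(marks, marks[1:] + [False])) if cur and not nxt]
--     result = list(zip(starts, ends))
--     return result or None
-- ===== Notes on version B (the rewrite author's own statement) =====
-- stated objective: alternative
-- what changed: Replaces A's online open/close state machine (start_idx sentinel plus post-loop flush) with mask-based edge detection: build a boolean match mask, find rising edges by comparing the mask with a False-padded left shift and falling edges with a right shift, then zip the start positions with the end positions.
import Mathlib
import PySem

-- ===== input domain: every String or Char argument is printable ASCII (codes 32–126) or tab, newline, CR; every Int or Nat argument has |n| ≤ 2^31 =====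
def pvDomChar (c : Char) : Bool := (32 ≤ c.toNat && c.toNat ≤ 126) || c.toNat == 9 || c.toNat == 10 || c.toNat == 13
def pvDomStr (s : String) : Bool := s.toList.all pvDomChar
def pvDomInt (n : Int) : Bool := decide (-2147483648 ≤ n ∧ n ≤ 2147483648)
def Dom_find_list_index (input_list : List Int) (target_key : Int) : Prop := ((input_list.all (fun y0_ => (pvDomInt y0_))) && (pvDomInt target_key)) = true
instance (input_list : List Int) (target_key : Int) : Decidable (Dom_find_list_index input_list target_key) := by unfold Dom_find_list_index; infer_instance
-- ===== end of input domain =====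

-- B replaces A's online open/close state machine by mask-based edge detection: a boolean
-- match mask is compared against its padded shifts to list rising and falling edges, which
-- are zipped into ranges; objective: alternative algorithm, same O(n) cost.

-- ===== PORT A =====
-- loop body of A's for-loop, as a named step function over the state (result, start_idx)
def fli_step (target_key : Int) (acc : List (Int × Int) × Option Int) (p : Int × Int) :
    List (Int × Int) × Option Int :=
  if p.2 = target_key then
    match acc.2 with
    | none => (acc.1, some p.1)
    | some _ => acc
  else
    match acc.2 with
    | some s => (acc.1 ++ [(s, p.1 - 1)], none)
    | none => acc

def find_list_index (input_list : List Int) (target_key : Int) : Option (List (Int × Int)) :=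
  let st := (PySem.List.enumerate input_list).foldl (fli_step target_key) ([], none)
  let result :=
    match st with
    | (r, some s) => r ++ [(s, (input_list.length : Int) - 1)]
    | (r, none) => r
  if result.length = 0 then none else some result

-- ===== PORT B =====
def find_list_index_alt (input_list : List Int) (target_key : Int) : Option (List (Int × Int)) :=
  let marks := input_list.map (fun v => v == target_key)
  let starts := (PySem.List.enumerate ((false :: marks).zip marks)).filterMap
      (fun p => if p.2.2 && !p.2.1 then some p.1 else none)
  let ends := (PySem.List.enumerate (marks.zip (PySem.List.slice marks (some 1) none ++ [false]))).filterMap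
      (fun p => if p.2.1 && !p.2.2 then some p.1 else none)
  let result := starts.zip ends
  if result = [] then none else some result

-- ===== PRECONDITION & SPEC =====
def Spec_find_list_index (input_list : List Int) (target_key : Int) (out : Option (List (Int × Int))) : Prop := out = find_list_index_alt input_list target_key
instance (input_list : List Int) (target_key : Int) (out : Option (List (Int × Int))) : Decidable (Spec_find_list_index input_list target_key out) := by unfold Spec_find_list_index; infer_instance

-- ===== CLAIM (what is proved, stated in full; the proofs are below) =====
def Claim_equal_find_list_index : Prop := ∀ (input_list : List Int) (target_key : Int), Dom_find_list_index input_list target_key → Spec_find_list_index input_list target_key (find_list_index input_list target_key)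

-- ===== LEMMAS AND PROOFS =====

-- A's loop over the boolean mask, written as structural recursion with the final flush folded in
def fli_R : List Bool → Option Int → Int → List (Int × Int)
  | [], none, _ => []
  | [], some s, i => [(s, i - 1)]
  | x :: t, none, i => if x then fli_R t (some i) (i + 1) else fli_R t none (i + 1)
  | x :: t, some s, i => if x then fli_R t (some s) (i + 1) else (s, i - 1) :: fli_R t none (i + 1)

-- rising edges: start positions, given whether the previous element matched
def fli_S : List Bool → Bool → Int → List Int
  | [], _, _ => []
  | x :: t, prev, i => (if x && !prev then [i] else []) ++ fli_S t x (i + 1)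

-- falling edges by lookahead: end positions
def fli_E : List Bool → Int → List Int
  | [], _ => []
  | x :: t, i => (if x && !(t.headD false) then [i] else []) ++ fli_E t (i + 1)

-- falling edges emitted one step late (as A's loop does), given whether a run is open
def fli_EL : List Bool → Bool → Int → List Int
  | [], prev, i => if prev then [i - 1] else []
  | x :: t, prev, i => (if !x && prev then [i - 1] else []) ++ fli_EL t x (i + 1)

-- the post-loop flush of A, with an explicit end index
def fli_flush (st : List (Int × Int) × Option Int) (e : Int) : List (Int × Int) :=
  match st with
  | (r, some s) => r ++ [(s, e)]
  | (r, none) => r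

theorem fli_bridge (key : Int) :
    ∀ (xs : List Int) (i : Int) (acc : List (Int × Int)) (st : Option Int) (e : Int),
      e = i + (xs.length : Int) - 1 →
      fli_flush ((PySem.List.enumerate xs i).foldl (fli_step key) (acc, st)) e
        = acc ++ fli_R (xs.map (fun v => v == key)) st i := by
  intro xs
  induction xs with
  | nil =>
    intro i acc st e he
    cases st <;> simp_all [PySem.List.enumerate_nil, fli_flush, fli_R]
  | cons x xs ih =>
    intro i acc st e he
    have he' : e = (i + 1) + (xs.length : Int) - 1 := by
      simp only [List.length_cons] at he; push_cast at he; omega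
    rw [PySem.List.enumerate_cons, List.foldl_cons]
    by_cases hx : x = key <;> cases st <;>
      simp [fli_step, hx, fli_R, ih _ _ _ _ he', List.append_assoc]

-- the state machine equals the zip of start edges with lagged end edges
theorem fli_R_zip : ∀ (t : List Bool) (i : Int),
    (fli_R t none i = (fli_S t false i).zip (fli_EL t false i)) ∧
    (∀ s : Int, fli_R t (some s) i = (s :: fli_S t true i).zip (fli_EL t true i)) := by
  intro t
  induction t with
  | nil => intro i; constructor <;> simp [fli_R, fli_S, fli_EL]
  | cons x r ih =>
    intro i
    constructor
    · cases x <;> simp [fli_R, fli_S, fli_EL, (ih (i + 1)).1, (ih (i + 1)).2]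
    · intro s
      cases x <;> simp [fli_R, fli_S, fli_EL, (ih (i + 1)).1, (ih (i + 1)).2]

-- lagged ends versus lookahead ends
theorem fli_EL_eq : ∀ (t : List Bool) (prev : Bool) (i : Int),
    fli_EL t prev i = (if prev && !(t.headD false) then [i - 1] else []) ++ fli_E t i := by
  intro t
  induction t with
  | nil => intro prev i; cases prev <;> simp [fli_EL, fli_E]
  | cons x r ih =>
    intro prev i
    cases prev <;> cases x <;>
      simp [fli_EL, fli_E, ih]

-- B's start comprehension computes fli_S
theorem fli_starts_eq : ∀ (marks : List Bool) (prev : Bool) (i : Int),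
    (PySem.List.enumerate ((prev :: marks).zip marks) i).filterMap
        (fun p => if p.2.2 && !p.2.1 then some p.1 else none)
      = fli_S marks prev i := by
  intro marks
  induction marks with
  | nil => intro prev i; simp [fli_S, PySem.List.enumerate_nil]
  | cons x r ih =>
    intro prev i
    rw [show (prev :: x :: r).zip (x :: r) = (prev, x) :: (x :: r).zip r from rfl,
        PySem.List.enumerate_cons, List.filterMap_cons, ih]
    cases prev <;> cases x <;> simp [fli_S]

-- B's end comprehension computes fli_E
theorem fli_ends_eq : ∀ (marks : List Bool) (i : Int),
    (PySem.List.enumerate (marks.zip (marks.tail ++ [false])) i).filterMap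
        (fun p => if p.2.1 && !p.2.2 then some p.1 else none)
      = fli_E marks i := by
  intro marks
  induction marks with
  | nil => intro i; simp [fli_E, PySem.List.enumerate_nil]
  | cons x r ih =>
    intro i
    have hzip : (x :: r).zip (r ++ [false]) = (x, r.headD false) :: r.zip (r.tail ++ [false]) := by
      cases r <;> rfl
    rw [show (x :: r).tail = r from rfl, hzip, PySem.List.enumerate_cons, List.filterMap_cons, ih]
    cases x <;> cases h : r.headD false <;>
      simp only [List.headD_eq_head?_getD] at h <;> simp [fli_E, h]

-- wrapping: A tests emptiness via len(result) == 0, B via 'result or None'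
theorem fli_wrap (L : List (Int × Int)) :
    (if L.length = 0 then (none : Option (List (Int × Int))) else some L)
      = (if L = [] then none else some L) := by
  cases L <;> simp

-- ===== VERDICT (by name: the statement is the Claim_ definition above) =====
theorem find_list_index_spec : Claim_equal_find_list_index := by
  intro input_list target_key _
  unfold Spec_find_list_index find_list_index find_list_index_alt
  have hb := fli_bridge target_key input_list 0 [] none ((input_list.length : Int) - 1) (by ring)
  simp only [fli_flush, List.nil_append] at hb
  simp only [hb, (fli_R_zip (input_list.map (fun v => v == target_key)) 0).1, fli_EL_eq,
    ← fli_starts_eq, ← fli_ends_eq, PySem.List.slice_from_one]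
  exact fli_wrap _
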